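-- pv_equiv track=rewrite | github.com/ryanpate/wordrise | app/game_engine.py | can_build_word
-- ===== SOURCE A (Python) =====
-- from collections import Counter
-- from typing import List, Dict, Optional, Tuple
--
-- def can_build_word(base_word: str, new_word: str) -> Tuple[bool, str]:
--     """
--     Check if new_word can be built on top of base_word
--
--     Rules:
--     1. Must use ALL letters from base_word
--     2. Must add exactly ONE new letter
--     3. Can rearrange letters in any order
--
--     Returns:
--         (is_valid, message) tuple
--     """
--     base_word = base_word.lower()
--     new_word = new_word.lower()
--
--     # Check length
--     if len(new_word) != len(base_word) + 1:
--         return False, f"Word must be exactly {len(base_word) + 1} letters long"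
--
--     # Count letters in each word
--     base_counter = Counter(base_word)
--     new_counter = Counter(new_word)
--
--     # Check if base letters are all present in new word
--     for letter, count in base_counter.items():
--         if new_counter[letter] < count:
--             return False, f"Must use all letters from '{base_word}'"
--
--     # Check if exactly one letter was added
--     added_letters = []
--     for letter, count in new_counter.items():
--         base_count = base_counter.get(letter, 0)
--         if count > base_count:
--             added_letters.extend([letter] * (count - base_count))
--
--     if len(added_letters) != 1:
--         return False, "Must add exactly one new letter"
--
--     return True, f"Added letter: {added_letters[0].upper()}"
-- ===== SOURCE B (Python) =====
-- def can_build_word(base_word: str, new_word: str):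
--     base_word = base_word.lower()
--     new_word = new_word.lower()
--
--     if len(new_word) != len(base_word) + 1:
--         return False, f"Word must be exactly {len(base_word) + 1} letters long"
--
--     # Eliminate base letters one by one instead of Counter arithmetic
--     remaining = list(base_word)
--     extra = ""
--     for ch in new_word:
--         if ch in remaining:
--             remaining.remove(ch)
--         else:
--             extra = ch
--
--     if remaining:
--         return False, f"Must use all letters from '{base_word}'"
--
--     return True, f"Added letter: {extra.upper()}"
-- ===== Notes on version B (the rewrite author's own statement) =====
-- stated objective: simpler
-- what changed: Replaces A's two Counter dictionaries and two item-iteration loops by a single elimination pass that removes each new-word letter from a working copy of the base word, keeping the one unmatched letter.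
import Mathlib
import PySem

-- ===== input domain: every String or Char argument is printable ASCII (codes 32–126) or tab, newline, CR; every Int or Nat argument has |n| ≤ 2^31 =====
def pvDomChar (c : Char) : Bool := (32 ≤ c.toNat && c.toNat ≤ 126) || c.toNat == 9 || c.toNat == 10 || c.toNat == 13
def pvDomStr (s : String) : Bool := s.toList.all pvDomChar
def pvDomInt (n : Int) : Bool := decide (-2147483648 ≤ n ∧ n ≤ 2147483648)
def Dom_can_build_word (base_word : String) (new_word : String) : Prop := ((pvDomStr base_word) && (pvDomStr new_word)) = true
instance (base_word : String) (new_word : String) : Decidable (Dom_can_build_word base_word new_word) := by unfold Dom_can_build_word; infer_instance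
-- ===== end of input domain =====

-- B replaces A's Counter bookkeeping by a one-pass elimination loop (remove each new-word letter
-- from a working copy of the base word); objective: simpler, same return values.

-- ===== PORT A =====
def can_build_word (base_word : String) (new_word : String) : Bool × String :=
  let base := PySem.Str.lower base_word
  let nw := PySem.Str.lower new_word
  if PySem.Str.len nw ≠ PySem.Str.len base + 1 then
    (false, "Word must be exactly " ++ PySem.Int.toStr (PySem.Str.len base + 1) ++ " letters long")
  else
    let base_counter := PySem.Dict.counter base.toList
    let new_counter := PySem.Dict.counter nw.toList
    -- 'for letter, count in base_counter.items(): if new_counter[letter] < count: return …'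
    -- (early return with a constant value = List.any over the items)
    if base_counter.items.any (fun lc => new_counter.getD lc.1 0 < lc.2) then
      (false, "Must use all letters from '" ++ base ++ "'")
    else
      let added := new_counter.items.foldl (fun acc lc =>
        let bcount := base_counter.getD lc.1 0
        if bcount < lc.2 then acc ++ List.replicate (lc.2 - bcount).toNat lc.1 else acc) []
      if added.length ≠ 1 then (false, "Must add exactly one new letter")
      else
        -- added_letters[0]: length is 1 here, so the default of getD is never used
        (true, "Added letter: " ++ String.mk [PySem.Chars.upperChar ((PySem.List.pyGet? added 0).getD ' ')])

-- ===== PORT B =====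
-- loop body of B: 'if ch in remaining: remaining.remove(ch) else: extra = ch'
-- (list.remove of a present element is List.erase, PySem.List.remove?_eq_some_erase)
def bstep (st : List Char × List Char) (ch : Char) : List Char × List Char :=
  if ch ∈ st.1 then (st.1.erase ch, st.2) else (st.1, [ch])

def can_build_word_alt (base_word : String) (new_word : String) : Bool × String :=
  let base := PySem.Str.lower base_word
  let nw := PySem.Str.lower new_word
  if PySem.Str.len nw ≠ PySem.Str.len base + 1 then
    (false, "Word must be exactly " ++ PySem.Int.toStr (PySem.Str.len base + 1) ++ " letters long")
  else
    let st := nw.toList.foldl bstep (base.toList, [])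
    if st.1 ≠ [] then (false, "Must use all letters from '" ++ base ++ "'")
    else (true, "Added letter: " ++ String.mk (PySem.Chars.upper st.2))

-- ===== PRECONDITION & SPEC =====
def Spec_can_build_word (base_word : String) (new_word : String) (out : Bool × String) : Prop := out = can_build_word_alt base_word new_word
instance (base_word : String) (new_word : String) (out : Bool × String) : Decidable (Spec_can_build_word base_word new_word out) := by unfold Spec_can_build_word; infer_instance

-- ===== CLAIM (what is proved, stated in full; the proofs are below) =====
def Claim_equal_can_build_word : Prop := ∀ (base_word : String) (new_word : String), Dom_can_build_word base_word new_word → Spec_can_build_word base_word new_word (can_build_word base_word new_word)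

-- ===== LEMMAS AND PROOFS =====

-- B's loop consumes a permutation of the remaining letters completely, leaving extra unchanged
lemma bfold_perm : ∀ (n r e : List Char), n.Perm r → List.foldl bstep (r, e) n = ([], e) := by
  intro n
  induction n with
  | nil =>
    intro r e h
    rw [List.Perm.eq_nil h.symm]
    rfl
  | cons c cs ih =>
    intro r e h
    have hc : c ∈ r := h.mem_iff.mp (List.mem_cons_self ..)
    have hcs : cs.Perm (r.erase c) := by
      have := (h.symm.erase c)
      simpa using this.symm
    simp [List.foldl_cons, bstep, hc, ih _ _ hcs]

-- B's loop on a word that is (a permutation of) the base plus one letter u ends with ([], [u])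
lemma bfold_succ : ∀ (n r : List Char) (u : Char) (e : List Char),
    n.Perm (u :: r) → List.foldl bstep (r, e) n = ([], [u]) := by
  intro n
  induction n with
  | nil => intro r u e h; exact absurd h.length_eq (by simp)
  | cons c cs ih =>
    intro r u e h
    by_cases hc : c ∈ r
    · have hcs : cs.Perm ((u :: r).erase c) := by
        have := h.symm.erase c
        simpa using this.symm
      by_cases hcu : c = u
      · subst hcu
        have hr : r.Perm (c :: r.erase c) := List.perm_cons_erase hc
        have h3 : cs.Perm r := by simpa using hcs
        simp [List.foldl_cons, bstep, hc, ih _ _ _ (h3.trans hr)]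
      · have : cs.Perm (u :: r.erase c) := by
          rwa [List.erase_cons_tail (by simp [Ne.symm hcu])] at hcs
        simp [List.foldl_cons, bstep, hc, ih _ _ _ this]
    · have hcu : c = u := by
        have hmem : c ∈ u :: r := h.mem_iff.mp (List.mem_cons_self ..)
        rcases List.mem_cons.mp hmem with h1 | h2
        · exact h1
        · exact absurd h2 hc
      subst hcu
      have hcs : cs.Perm r := by
        have := h.symm.erase c
        simpa using this.symm
      simp [List.foldl_cons, bstep, hc, bfold_perm _ _ _ hcs]

-- the left component of B's loop state is emptied iff every base letter is covered
lemma bfold_empty_iff : ∀ (n r e : List Char),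
    (List.foldl bstep (r, e) n).1 = [] ↔ ∀ c, r.count c ≤ n.count c := by
  intro n
  induction n with
  | nil =>
    intro r e
    cases r with
    | nil => simp
    | cons x xs =>
      simp only [List.foldl_nil]
      constructor
      · intro h; simp at h
      · intro h
        have := h x
        simp at this
  | cons c cs ih =>
    intro r e
    by_cases hc : c ∈ r
    · rw [List.foldl_cons]
      simp only [bstep, if_pos hc]
      rw [ih]
      constructor
      · intro h d
        have := h d
        rw [List.count_erase] at this
        by_cases hdc : d = c <;> simp [hdc, List.count_cons] at this ⊢ <;> omega
      · intro h d
        have := h d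
        rw [List.count_erase]
        have hpos : 0 < r.count c := List.count_pos_iff.mpr hc
        by_cases hdc : d = c <;> simp [hdc, List.count_cons] at this ⊢ <;> omega
    · rw [List.foldl_cons]
      simp only [bstep, if_neg hc]
      rw [ih]
      constructor
      · intro h d
        have := h d
        simp [List.count_cons]
        omega
      · intro h d
        have := h d
        have hz : r.count c = 0 := List.count_eq_zero.mpr hc
        rw [List.count_cons] at this
        rcases eq_or_ne c d with rfl | hdc
        · simp at this; omega
        · simp [hdc] at this; omega

-- a length-(+1) superset (by counts) of b is a permutation of u :: b for some u
lemma exists_cons_perm {b n : List Char} (hle : ∀ c, b.count c ≤ n.count c)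
    (hl : n.length = b.length + 1) : ∃ u, n.Perm (u :: b) := by
  have hsub : (b : Multiset Char) ≤ (n : Multiset Char) := by
    rw [Multiset.le_iff_count]; intro a; simpa using hle a
  have hcard : Multiset.card ((n : Multiset Char) - (b : Multiset Char)) = 1 := by
    rw [Multiset.card_sub hsub]; simp [hl]
  obtain ⟨u, hu⟩ := Multiset.card_eq_one.mp hcard
  refine ⟨u, Multiset.coe_eq_coe.mp ?_⟩
  have h2 := tsub_add_cancel_of_le hsub
  rw [hu] at h2
  rw [← Multiset.cons_coe, ← h2]
  simp [Multiset.singleton_add]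

lemma flatMap_single {α : Type} (g : α → List α) (u : α) :
    ∀ xs : List α, xs.Nodup → u ∈ xs → (∀ k ∈ xs, k ≠ u → g k = []) → g u = [u] →
    xs.flatMap g = [u] := by
  intro xs
  induction xs with
  | nil => intro _ h; simp at h
  | cons x xs ih =>
    intro hnd hmem hz hu
    rcases List.mem_cons.mp hmem with rfl | hmem'
    · have : xs.flatMap g = [] := by
        apply List.flatMap_eq_nil_iff.mpr
        intro k hk
        exact hz k (List.mem_cons_of_mem _ hk) (fun he => (List.nodup_cons.mp hnd).1 (he ▸ hk))
      simp [this, hu]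
    · have hx : g x = [] := hz x (List.mem_cons_self ..) (fun he => (List.nodup_cons.mp hnd).1 (he ▸ hmem'))
      simp [hx, ih (List.nodup_cons.mp hnd).2 hmem' (fun k hk => hz k (List.mem_cons_of_mem _ hk)) hu]

-- A's added_letters loop yields exactly [u] when the new word is base plus the letter u
lemma added_eq (b n : List Char) (u : Char) (hperm : n.Perm (u :: b)) :
    (PySem.Dict.counter n).items.foldl (fun acc lc =>
        let bcount := (PySem.Dict.counter b).getD lc.1 0
        if bcount < lc.2 then acc ++ List.replicate (lc.2 - bcount).toNat lc.1 else acc) [] = [u] := by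
  have hbody : (fun (acc : List Char) (lc : Char × Int) =>
      let bcount := (PySem.Dict.counter b).getD lc.1 0
      if bcount < lc.2 then acc ++ List.replicate (lc.2 - bcount).toNat lc.1 else acc)
      = fun acc lc => acc ++ (if (PySem.Dict.counter b).getD lc.1 0 < lc.2 then
          List.replicate (lc.2 - (PySem.Dict.counter b).getD lc.1 0).toNat lc.1 else []) := by
    funext acc lc
    dsimp only
    split <;> simp
  rw [hbody, PySem.List.foldl_append_eq_flatMap, PySem.Dict.items_counter, List.flatMap_map,
    List.nil_append]
  apply flatMap_single _ u _ (PySem.Set.nodup_ofList n)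
  · exact (PySem.Set.mem_ofList ..).mpr (hperm.mem_iff.mpr (List.mem_cons_self ..))
  · intro k _ hk
    have hck : n.count k = b.count k := by
      rw [hperm.count_eq]
      simp [Ne.symm hk]
    simp [PySem.Dict.getD_counter, hck]
  · have hcu : n.count u = b.count u + 1 := by
      rw [hperm.count_eq]
      simp
    simp [PySem.Dict.getD_counter, hcu]

-- the whole post-length-check computation, at the letter-list level
lemma core_eq (base : String) (b n : List Char) (hl : n.length = b.length + 1) :
    (if (PySem.Dict.counter b).items.any (fun lc => (PySem.Dict.counter n).getD lc.1 0 < lc.2) then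
       (false, "Must use all letters from '" ++ base ++ "'")
     else
       let added := (PySem.Dict.counter n).items.foldl (fun acc lc =>
         let bcount := (PySem.Dict.counter b).getD lc.1 0
         if bcount < lc.2 then acc ++ List.replicate (lc.2 - bcount).toNat lc.1 else acc) []
       if added.length ≠ 1 then (false, "Must add exactly one new letter")
       else (true, "Added letter: " ++ String.mk [PySem.Chars.upperChar ((PySem.List.pyGet? added 0).getD ' ')]))
    = (let st := n.foldl bstep (b, [])
       if st.1 ≠ [] then (false, "Must use all letters from '" ++ base ++ "'")
       else (true, "Added letter: " ++ String.mk (PySem.Chars.upper st.2))) := by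
  by_cases hle : ∀ c : Char, b.count c ≤ n.count c
  · obtain ⟨u, hperm⟩ := exists_cons_perm hle hl
    have hany : ((PySem.Dict.counter b).items.any
        (fun lc => decide ((PySem.Dict.counter n).getD lc.1 0 < lc.2))) = false := by
      simp only [PySem.Dict.items_counter, List.any_map, List.any_eq_false, Function.comp]
      intro k _
      simp [PySem.Dict.getD_counter]
      exact_mod_cast hle k
    have hB := bfold_succ n b u [] hperm
    have hA := added_eq b n u hperm
    rw [hany]
    dsimp only
    rw [hA, hB]
    simp [PySem.List.pyGet?, PySem.List.pyIdx?, PySem.Chars.upper]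
  · have hany : ((PySem.Dict.counter b).items.any
        (fun lc => decide ((PySem.Dict.counter n).getD lc.1 0 < lc.2))) = true := by
      rw [not_forall] at hle
      obtain ⟨c, hc⟩ := hle
      rw [not_le] at hc
      simp only [PySem.Dict.items_counter, List.any_map, List.any_eq_true, Function.comp]
      refine ⟨c, (PySem.Set.mem_ofList ..).mpr (List.count_pos_iff.mp (by omega)), ?_⟩
      simp [PySem.Dict.getD_counter]
      exact_mod_cast hc
    have hB : (n.foldl bstep (b, [])).1 ≠ [] := by
      rw [ne_eq, bfold_empty_iff]
      exact hle
    rw [hany]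
    dsimp only
    simp [hB]

-- ===== VERDICT (by name: the statement is the Claim_ definition above) =====
theorem can_build_word_spec : Claim_equal_can_build_word := by
  intro bw nw _
  unfold Spec_can_build_word can_build_word can_build_word_alt
  dsimp only
  by_cases hlen : PySem.Str.len (PySem.Str.lower nw) ≠ PySem.Str.len (PySem.Str.lower bw) + 1
  · rw [if_pos hlen, if_pos hlen]
  · have h2 : PySem.Str.len (PySem.Str.lower nw) = PySem.Str.len (PySem.Str.lower bw) + 1 :=
      not_not.mp hlen
    have e1 : PySem.Str.len (PySem.Str.lower nw) = ((PySem.Str.lower nw).toList.length : Int) := by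
      simp [PySem.Str.len]
    have e2 : PySem.Str.len (PySem.Str.lower bw) = ((PySem.Str.lower bw).toList.length : Int) := by
      simp [PySem.Str.len]
    have hl : ((PySem.Str.lower nw).toList).length = ((PySem.Str.lower bw).toList).length + 1 := by
      omega
    rw [if_neg hlen, if_neg hlen]
    exact core_eq (PySem.Str.lower bw) (PySem.Str.lower bw).toList (PySem.Str.lower nw).toList hl
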